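-- pv_equiv track=rewrite | github.com/delfi21/guias-Python | guia7.py | filas_ordenadas
-- ===== SOURCE A (Python) =====
-- def ordenados(s:list[int])->bool:
--     res:bool=True
--     i:int=0
--     while res and i<len(s)-1: #si es vacia len= 0 y esto es falso no?
--         if s[i] > s[i+1]:
--             res=False
--         i=i+1
--     return res
--
-- def filas_ordenadas(matriz:list[list[int]])-> bool:
--     estan_ordenadas:bool=True
--     i=0
--     while estan_ordenadas and i< len(matriz):
--         if not ordenados(matriz[i]):
--             estan_ordenadas=False
--         i=i+1
--     return estan_ordenadas
-- ===== SOURCE B (Python) =====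
-- def filas_ordenadas(matriz: list[list[int]]) -> bool:
--     return all(fila == sorted(fila) for fila in matriz)
-- ===== Notes on version B (the rewrite author's own statement) =====
-- stated objective: idiomatic
-- what changed: Replaces the index-based while loops with early-exit flags (helper scanning adjacent pairs) by a one-liner that tests each row for equality with its sorted copy via all().
import Mathlib
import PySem

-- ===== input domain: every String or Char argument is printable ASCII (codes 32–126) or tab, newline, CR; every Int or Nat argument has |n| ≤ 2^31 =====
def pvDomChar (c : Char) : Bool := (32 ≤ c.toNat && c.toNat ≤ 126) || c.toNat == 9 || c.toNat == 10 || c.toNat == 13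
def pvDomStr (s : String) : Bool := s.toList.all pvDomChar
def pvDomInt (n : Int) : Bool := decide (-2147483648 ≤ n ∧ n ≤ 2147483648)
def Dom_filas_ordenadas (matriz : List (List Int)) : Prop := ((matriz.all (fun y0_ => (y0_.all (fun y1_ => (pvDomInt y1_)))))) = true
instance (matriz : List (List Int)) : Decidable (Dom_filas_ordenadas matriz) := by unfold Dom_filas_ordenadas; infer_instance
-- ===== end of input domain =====

-- B replaces A's index-based while loops with early-exit flags by testing each row
-- for equality with its sorted copy (idiomatic one-liner); equivalence of RETURN values proved below.

-- ===== PORT A =====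
-- while res and i < len(s)-1: early exit as soon as res flips to False
def ordenados_go (s : List Int) (i : Nat) : Bool :=
  if i < s.length - 1 then
    if ((PySem.List.pyGet? s (i : Int)).getD 0) > ((PySem.List.pyGet? s ((i : Int) + 1)).getD 0) then
      false
    else
      ordenados_go s (i + 1)
  else
    true
termination_by s.length - i

def ordenados (s : List Int) : Bool := ordenados_go s 0

def filas_ordenadas_go (matriz : List (List Int)) (i : Nat) : Bool :=
  if i < matriz.length then
    if ¬ ordenados (((PySem.List.pyGet? matriz (i : Int)).getD [])) then
      false
    else
      filas_ordenadas_go matriz (i + 1)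
  else
    true
termination_by matriz.length - i

def filas_ordenadas (matriz : List (List Int)) : Bool := filas_ordenadas_go matriz 0

-- ===== PORT B =====
def filas_ordenadas_alt (matriz : List (List Int)) : Bool :=
  matriz.all (fun fila => fila == PySem.List.sorted fila (fun x => x) false)

-- ===== PRECONDITION & SPEC =====
def Spec_filas_ordenadas (matriz : List (List Int)) (out : Bool) : Prop := out = filas_ordenadas_alt matriz
instance (matriz : List (List Int)) (out : Bool) : Decidable (Spec_filas_ordenadas matriz out) := by unfold Spec_filas_ordenadas; infer_instance

-- ===== CLAIM (what is proved, stated in full; the proofs are below) =====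
def Claim_equal_filas_ordenadas : Prop := ∀ (matriz : List (List Int)), Dom_filas_ordenadas matriz → Spec_filas_ordenadas matriz (filas_ordenadas matriz)

-- ===== LEMMAS AND PROOFS =====

theorem ordenados_go_iff (s : List Int) : ∀ d i, s.length - i ≤ d →
    (ordenados_go s i = true ↔ ∀ j, i ≤ j → ∀ (hj : j + 1 < s.length), s[j] ≤ s[j+1]) := by
  intro d
  induction d with
  | zero =>
    intro i hi
    rw [ordenados_go, if_neg (by omega)]
    simp only [true_iff]
    intro j hij hj
    omega
  | succ n ih =>
    intro i hi
    rw [ordenados_go]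
    by_cases hlt : i < s.length - 1
    · rw [if_pos hlt]
      have h1 : i < s.length := by omega
      have h2 : i + 1 < s.length := by omega
      have e1 : (PySem.List.pyGet? s (i : Int)).getD 0 = s[i] := by
        rw [PySem.List.pyGet?_natCast, List.getElem?_eq_getElem h1, Option.getD_some]
      have e2 : (PySem.List.pyGet? s ((i : Int) + 1)).getD 0 = s[i+1] := by
        have : (i : Int) + 1 = ((i + 1 : Nat) : Int) := by push_cast; ring
        rw [this, PySem.List.pyGet?_natCast, List.getElem?_eq_getElem h2, Option.getD_some]
      rw [e1, e2]
      by_cases hgt : s[i] > s[i+1]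
      · rw [if_pos (by simpa using hgt)]
        simp only [Bool.false_eq_true, false_iff]
        intro h
        exact absurd (h i le_rfl h2) (by omega)
      · rw [if_neg (by simpa using hgt)]
        rw [ih (i+1) (by omega)]
        constructor
        · intro h j hij hj
          rcases Nat.eq_or_lt_of_le hij with rfl | hij'
          · omega
          · exact h j hij' hj
        · intro h j hij hj
          exact h j (by omega) hj
    · rw [if_neg hlt]
      simp only [true_iff]
      intro j hij hj
      omega

theorem ordenados_iff_pairwise (s : List Int) :
    ordenados s = true ↔ s.Pairwise (· ≤ ·) := by
  unfold ordenados
  rw [ordenados_go_iff s (s.length) 0 (by omega)]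
  constructor
  · intro h
    have hc : s.IsChain (· ≤ ·) := by
      rw [List.isChain_iff_getElem]
      intro j hj
      exact h j (Nat.zero_le j) hj
    exact hc.pairwise
  · intro hp j _ hj
    rw [List.pairwise_iff_getElem] at hp
    exact hp j (j+1) (by omega) hj (by omega)

theorem ordenados_eq_sorted (s : List Int) :
    ordenados s = (s == PySem.List.sorted s (fun x => x) false) := by
  by_cases h : ordenados s = true
  · rw [h]
    have hp : s.Pairwise (fun a b => a ≤ b) := (ordenados_iff_pairwise s).mp h
    rw [PySem.List.sorted_eq_self_of_pairwise _ _ hp]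
    exact (beq_self_eq_true s).symm
  · simp only [Bool.not_eq_true] at h
    rw [h]
    symm
    simp only [beq_eq_false_iff_ne, ne_eq]
    intro heq
    have hp : s.Pairwise (fun a b => a ≤ b) := by
      rw [heq]
      exact PySem.List.sorted_pairwise s (fun x => x)
    have := (ordenados_iff_pairwise s).mpr hp
    rw [h] at this
    exact Bool.false_ne_true this

theorem filas_go_eq (matriz : List (List Int)) : ∀ d i, matriz.length - i ≤ d →
    filas_ordenadas_go matriz i = (matriz.drop i).all ordenados := by
  intro d
  induction d with
  | zero =>
    intro i hi
    rw [filas_ordenadas_go, if_neg (by omega), List.drop_eq_nil_of_le (by omega), List.all_nil]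
  | succ n ih =>
    intro i hi
    rw [filas_ordenadas_go]
    by_cases hlt : i < matriz.length
    · rw [if_pos hlt]
      have e1 : (PySem.List.pyGet? matriz (i : Int)).getD [] = matriz[i] := by
        rw [PySem.List.pyGet?_natCast, List.getElem?_eq_getElem hlt, Option.getD_some]
      rw [e1, List.drop_eq_getElem_cons hlt, List.all_cons]
      by_cases hrow : ordenados matriz[i] = true
      · rw [if_neg (by simp [hrow]), ih (i+1) (by omega), hrow, Bool.true_and]
      · rw [if_pos (by simpa using hrow)]
        simp only [Bool.not_eq_true] at hrow
        rw [hrow, Bool.false_and]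
    · rw [if_neg hlt, List.drop_eq_nil_of_le (by omega), List.all_nil]

-- ===== VERDICT (by name: the statement is the Claim_ definition above) =====
theorem filas_ordenadas_spec : Claim_equal_filas_ordenadas := by
  intro matriz _
  unfold Spec_filas_ordenadas filas_ordenadas filas_ordenadas_alt
  rw [filas_go_eq matriz matriz.length 0 (by omega)]
  simp only [List.drop_zero]
  congr 1
  funext fila
  exact ordenados_eq_sorted fila
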